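-- pv_equiv track=rewrite | github.com/IdrisHanafi/AmazonSearchEngine | src/generate_review_features.py | quality_text_score
-- ===== SOURCE A (Python) =====
-- WORD_SET_GOOD_QUALITY = set([
--     "good_quality", "great_quality", "high_quality", "excellent_quality",
--     "quality_product", "nice_quality", "better_quality", "best_quality",
--     "highest_quality", "amazing_quality", "awesome_quality", "top_quality",
--     "quality_item", "quality_made", "quality_material", "works_great",
--     "works_well", "works_perfectly", "worked_great", "work_great", "work_well",
--     "worked_perfectly","works_flawlessly", "worked_flawlessly", "worked_perfect",
--     "working_perfectly", "works_wonderfully", "works_amazingly", "work_wonderfully",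
--     "work_excellent", "work_awesome", "worked_excellent", "quality_construction",
--     "built_quality", "fantastic_quality", "perfect_quality", "superior_quality"
-- ])
--
-- WORD_SET_BAD_QUALITY = set([
--     "poor_quality", "low_quality", "cheap_quality", "bad_quality",
--     "quality_control", "poor_build", "stopped_working", "stop_working",
--     "never_worked", "quit_working", "nothing_works", "stop_working"
-- ])
--
-- def quality_text_score(text):
--     score = 0
--     for token in text:
--         if token in WORD_SET_GOOD_QUALITY:
--             score += 1
--         if token in WORD_SET_BAD_QUALITY:
--             score -= 1
--
--     return score
-- ===== SOURCE B (Python) =====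
-- GOOD_QUALITY_WORDS = (
--     "good_quality great_quality high_quality excellent_quality quality_product".split()
--     + "nice_quality better_quality best_quality highest_quality amazing_quality".split()
--     + "awesome_quality top_quality quality_item quality_made quality_material".split()
--     + "works_great works_well works_perfectly worked_great work_great".split()
--     + "work_well worked_perfectly works_flawlessly worked_flawlessly worked_perfect".split()
--     + "working_perfectly works_wonderfully works_amazingly work_wonderfully".split()
--     + "work_excellent work_awesome worked_excellent quality_construction".split()
--     + "built_quality fantastic_quality perfect_quality superior_quality".split()
-- )
--
-- BAD_QUALITY_WORDS = (
--     "poor_quality low_quality cheap_quality bad_quality quality_control poor_build".split()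
--     + "stopped_working stop_working never_worked quit_working nothing_works".split()
-- )
--
--
-- def quality_text_score(text):
--     # Stage 1: build a frequency table of the tokens in one pass.
--     counts = {}
--     for t in text:
--         counts[t] = counts.get(t, 0) + 1
--     # Stage 2: score by iterating the fixed vocabularies and looking up counts.
--     good = sum(counts.get(w, 0) for w in GOOD_QUALITY_WORDS)
--     bad = sum(counts.get(w, 0) for w in BAD_QUALITY_WORDS)
--     return good - bad
-- ===== Notes on version B (the rewrite author's own statement) =====
-- stated objective: alternative
-- what changed: B builds a token-frequency table in one pass and then scores by iterating the fixed good/bad vocabularies (kept as whitespace-split word strings) and summing count lookups, instead of A's single scan over the tokens with set-membership tests updating a running accumulator.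
import Mathlib
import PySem

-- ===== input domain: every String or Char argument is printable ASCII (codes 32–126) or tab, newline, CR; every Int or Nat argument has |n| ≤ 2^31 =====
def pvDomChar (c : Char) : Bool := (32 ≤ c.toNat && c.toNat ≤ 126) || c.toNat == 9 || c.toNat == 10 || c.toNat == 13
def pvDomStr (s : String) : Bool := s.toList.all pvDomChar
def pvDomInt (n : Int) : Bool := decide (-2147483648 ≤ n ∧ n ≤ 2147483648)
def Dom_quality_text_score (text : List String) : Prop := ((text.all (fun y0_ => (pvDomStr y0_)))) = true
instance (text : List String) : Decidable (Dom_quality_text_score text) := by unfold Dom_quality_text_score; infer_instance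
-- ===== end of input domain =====

-- B builds a token-frequency table in one pass and then scores by iterating the fixed
-- vocabularies (whitespace-split word strings) summing count lookups, instead of A's
-- membership-tested running accumulator over the tokens (objective: alternative).

-- ===== PORT A =====
-- A's two module-level Python sets (distinct elements, set-literal order)
def wordSetGoodQuality : List String :=
  ["good_quality", "great_quality", "high_quality", "excellent_quality",
   "quality_product", "nice_quality", "better_quality", "best_quality",
   "highest_quality", "amazing_quality", "awesome_quality", "top_quality",
   "quality_item", "quality_made", "quality_material", "works_great",
   "works_well", "works_perfectly", "worked_great", "work_great", "work_well",
   "worked_perfectly", "works_flawlessly", "worked_flawlessly", "worked_perfect",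
   "working_perfectly", "works_wonderfully", "works_amazingly", "work_wonderfully",
   "work_excellent", "work_awesome", "worked_excellent", "quality_construction",
   "built_quality", "fantastic_quality", "perfect_quality", "superior_quality"]

def wordSetBadQuality : List String :=
  ["poor_quality", "low_quality", "cheap_quality", "bad_quality",
   "quality_control", "poor_build", "stopped_working", "stop_working",
   "never_worked", "quit_working", "nothing_works"]

def quality_text_score (text : List String) : Int :=
  text.foldl (fun score token =>
    let score := if wordSetGoodQuality.contains token then score + 1 else score
    if wordSetBadQuality.contains token then score - 1 else score) 0

-- ===== PORT B =====
-- Source B's vocabularies: grouped space-separated word strings, .split() and concatenated at module load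
def goodQualityWords : List String :=
  PySem.Str.split₀ "good_quality great_quality high_quality excellent_quality quality_product"
  ++ PySem.Str.split₀ "nice_quality better_quality best_quality highest_quality amazing_quality"
  ++ PySem.Str.split₀ "awesome_quality top_quality quality_item quality_made quality_material"
  ++ PySem.Str.split₀ "works_great works_well works_perfectly worked_great work_great"
  ++ PySem.Str.split₀ "work_well worked_perfectly works_flawlessly worked_flawlessly worked_perfect"
  ++ PySem.Str.split₀ "working_perfectly works_wonderfully works_amazingly work_wonderfully"
  ++ PySem.Str.split₀ "work_excellent work_awesome worked_excellent quality_construction"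
  ++ PySem.Str.split₀ "built_quality fantastic_quality perfect_quality superior_quality"

def badQualityWords : List String :=
  PySem.Str.split₀ "poor_quality low_quality cheap_quality bad_quality quality_control poor_build"
  ++ PySem.Str.split₀ "stopped_working stop_working never_worked quit_working nothing_works"

-- stage 1 of Source B: the counts-building for-loop, as structural recursion on the tokens
def tallyCounts : PySem.Dict String Int → List String → PySem.Dict String Int
  | d, [] => d
  | d, t :: rest => tallyCounts (d.insert t (d.getD t 0 + 1)) rest

-- stage 2 of Source B: sum(counts.get(w, 0) for w in ws)
def sumLookups (counts : PySem.Dict String Int) : List String → Int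
  | [] => 0
  | w :: ws => counts.getD w 0 + sumLookups counts ws

def quality_text_score_alt (text : List String) : Int :=
  let counts := tallyCounts PySem.Dict.empty text
  let good := sumLookups counts goodQualityWords
  let bad := sumLookups counts badQualityWords
  good - bad

-- ===== PRECONDITION & SPEC =====
def Spec_quality_text_score (text : List String) (out : Int) : Prop := out = quality_text_score_alt text
instance (text : List String) (out : Int) : Decidable (Spec_quality_text_score text out) := by unfold Spec_quality_text_score; infer_instance

-- ===== CLAIM (what is proved, stated in full; the proofs are below) =====
def Claim_equal_quality_text_score : Prop := ∀ (text : List String), Dom_quality_text_score text → Spec_quality_text_score text (quality_text_score text)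

-- ===== LEMMAS AND PROOFS =====

lemma tallyCounts_eq_foldl (text : List String) (d : PySem.Dict String Int) :
    tallyCounts d text = text.foldl (fun d t => d.insert t (d.getD t 0 + 1)) d := by
  induction text generalizing d with
  | nil => rfl
  | cons t l ih => simp [tallyCounts, ih]

lemma tallyCounts_getD (text : List String) (w : String) :
    (tallyCounts PySem.Dict.empty text).getD w 0 = (text.count w : Int) := by
  rw [tallyCounts_eq_foldl, PySem.Dict.getD_foldl_insert_add_one]
  simp [PySem.Dict.getD_empty]

lemma sumLookups_eq_sum (counts : PySem.Dict String Int) (ws : List String) :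
    sumLookups counts ws = (ws.map (fun w => counts.getD w 0)).sum := by
  induction ws with
  | nil => rfl
  | cons w ws ih => simp [sumLookups, ih]

-- for a duplicate-free vocabulary ws, summing text's per-word counts over ws
-- equals summing a 0/1 membership indicator over the tokens
lemma sum_counts_eq_indicator (ws : List String) (hnd : ws.Nodup) (text : List String) :
    (ws.map (fun w => (text.count w : Int))).sum
      = (text.map (fun t => if ws.contains t then (1 : Int) else 0)).sum := by
  induction text with
  | nil => simp
  | cons t l ih =>
    have hcnt : (ws.map (fun w => ((t :: l).count w : Int))).sum
        = (ws.map (fun w => (l.count w : Int))).sum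
          + (ws.map (fun w => if w == t then (1 : Int) else 0)).sum := by
      rw [← List.sum_map_add]
      congr 1
      apply List.map_congr_left
      intro w _
      simp [List.count_cons]
      by_cases h : w = t
      · simp [h]
      · simp [h, Ne.symm h]
    have hind : (ws.map (fun w => if w == t then (1 : Int) else 0)).sum
        = if ws.contains t then (1 : Int) else 0 := by
      rw [PySem.List.sum_map_ite_one_zero]
      by_cases h : t ∈ ws
      · have : ws.countP (fun w => w == t) = ws.count t := by
          simp [List.count]
        rw [this, List.count_eq_one_of_mem hnd h]
        simp [h]
      · have : ws.countP (fun w => w == t) = ws.count t := by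
          simp [List.count]
        rw [this, List.count_eq_zero_of_not_mem h]
        simp [h]
    simp only [List.map_cons, List.sum_cons, hcnt, ih, hind]
    ring

set_option maxRecDepth 16384 in
set_option maxHeartbeats 2000000 in
lemma good_split : goodQualityWords = wordSetGoodQuality := by decide
set_option maxRecDepth 16384 in
set_option maxHeartbeats 2000000 in
lemma bad_split : badQualityWords = wordSetBadQuality := by decide

lemma good_nodup : wordSetGoodQuality.Nodup := by decide
lemma bad_nodup : wordSetBadQuality.Nodup := by decide

lemma sum_map_sub' {α : Type} (f g : α → Int) (l : List α) :
    (l.map (fun t => f t - g t)).sum = (l.map f).sum - (l.map g).sum := by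
  induction l with
  | nil => simp
  | cons a l ih => simp [ih]; ring

-- A's accumulator fold is the sum of a per-token delta
lemma foldl_score_eq_sum (text : List String) (init : Int) :
    text.foldl (fun score token =>
      let score := if wordSetGoodQuality.contains token then score + 1 else score
      if wordSetBadQuality.contains token then score - 1 else score) init
    = init + (text.map (fun t =>
        (if wordSetGoodQuality.contains t then (1 : Int) else 0)
        - (if wordSetBadQuality.contains t then (1 : Int) else 0))).sum := by
  induction text generalizing init with
  | nil => simp
  | cons t l ih =>
    simp only [List.foldl_cons, List.map_cons, List.sum_cons, ih]
    split_ifs <;> ring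

-- ===== VERDICT (by name: the statement is the Claim_ definition above) =====
theorem quality_text_score_spec : Claim_equal_quality_text_score := by
  intro text _
  unfold Spec_quality_text_score quality_text_score quality_text_score_alt
  simp only [good_split, bad_split, sumLookups_eq_sum]
  have hgetD : ∀ w, (tallyCounts PySem.Dict.empty text).getD w 0 = (text.count w : Int) :=
    tallyCounts_getD text
  simp only [hgetD]
  rw [sum_counts_eq_indicator _ good_nodup, sum_counts_eq_indicator _ bad_nodup,
      foldl_score_eq_sum, zero_add, ← sum_map_sub']
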